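-- pv_equiv track=rewrite | github.com/harshnative/git-utility | gitController.py | isSubStringsNoCase
-- ===== SOURCE A (Python) =====
-- def isSubString(string, subString):
--     lengthOfSubString = len(subString)
--     try:
--         for i, j in enumerate(string):
--             if(j == subString[0]):
--                 if(subString == string[i:i+lengthOfSubString]):
--                     return True
--                 else:
--                     pass
--         return False
--     except Exception:
--         return False
--
-- def isSubStringsNoCase(string , subString):
--     string = string.upper()
--     subString = subString.upper()
--
--     subStringList = subString.split()
--
--     count1 = 0
--     count2 = 0
--
--     for i in subStringList:
--         i = i.strip()
--         count1 += 1
--         if(isSubString(string , i)):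
--             count2 += 1
--         else:
--             return False
--
--
--     if((count1 == count2) and count1 > 0):
--         return True
--     else:
--         return False
-- ===== SOURCE B (Python) =====
-- def isSubStringsNoCase(string, subString):
--     # B: one pass per word using Python's built-in substring search instead of
--     # A's hand-written character-by-character scan with match counters.
--     s = string.upper()
--     words = subString.upper().split()
--     return bool(words) and all(w in s for w in words)
-- ===== Notes on version B (the rewrite author's own statement) =====
-- stated objective: faster
-- what changed: Replaces A's hand-written first-char-match-then-slice-compare scan (inside a counting loop with two counters and an equality check at the end) by Python's built-in substring search with an all() over the split words.
import Mathlib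
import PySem

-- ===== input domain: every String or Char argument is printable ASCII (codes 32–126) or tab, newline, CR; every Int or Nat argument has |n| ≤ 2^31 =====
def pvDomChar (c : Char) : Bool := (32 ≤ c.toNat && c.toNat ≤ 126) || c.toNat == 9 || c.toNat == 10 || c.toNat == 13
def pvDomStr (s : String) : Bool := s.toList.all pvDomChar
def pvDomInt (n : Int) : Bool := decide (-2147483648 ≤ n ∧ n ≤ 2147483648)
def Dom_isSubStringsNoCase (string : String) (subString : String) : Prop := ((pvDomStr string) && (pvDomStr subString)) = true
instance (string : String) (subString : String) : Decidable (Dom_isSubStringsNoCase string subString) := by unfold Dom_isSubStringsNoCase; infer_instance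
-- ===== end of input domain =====

-- B's only intended change vs A is the algorithm (built-in substring search, all over the words);
-- the return value is identical on every input (A is total: its try/except catches the only possible exception).

-- ===== PORT A =====
-- isSubString's loop: 'for i, j in enumerate(string): if j == subString[0]: if subString == string[i:i+len(sub)]: return True'
-- subString[0] raising (empty subString) is the only exception; the surrounding try/except returns False there.
def isSubStringGo (string sub : List Char) (m : Nat) : List (Int × Char) → Bool
  | [] => false
  | (i, j) :: rest =>
    match PySem.List.pyGet? sub 0 with
    | none => false      -- IndexError on subString[0], caught by 'except: return False'
    | some c0 =>
      if j == c0 then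
        if sub == PySem.List.slice string (some i) (some (i + (m : Int))) then true
        else isSubStringGo string sub m rest
      else isSubStringGo string sub m rest

def isSubStringA (string sub : List Char) : Bool :=
  isSubStringGo string sub sub.length (PySem.List.enumerate string)

-- the for-loop of isSubStringsNoCase with its two counters and early 'return False'
def loopA (s : List Char) : List (List Char) → Int → Int → Bool
  | [], c1, c2 => if c1 = c2 ∧ 0 < c1 then true else false
  | w :: rest, c1, c2 =>
    let w' := PySem.Chars.strip w
    if isSubStringA s w' then loopA s rest (c1 + 1) (c2 + 1) else false

def isSubStringsNoCase (string : String) (subString : String) : Bool :=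
  let s := PySem.Chars.upper string.toList
  let sub := PySem.Chars.upper subString.toList
  let subStringList := PySem.Chars.split₀ sub
  loopA s subStringList 0 0

-- ===== PORT B =====
def isSubStringsNoCase_alt (string : String) (subString : String) : Bool :=
  let s := PySem.Chars.upper string.toList
  let words := PySem.Chars.split₀ (PySem.Chars.upper subString.toList)
  !words.isEmpty && words.all (fun w => PySem.Chars.isIn w s)

-- ===== PRECONDITION & SPEC =====
def Spec_isSubStringsNoCase (string : String) (subString : String) (out : Bool) : Prop := out = isSubStringsNoCase_alt string subString
instance (string : String) (subString : String) (out : Bool) : Decidable (Spec_isSubStringsNoCase string subString out) := by unfold Spec_isSubStringsNoCase; infer_instance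

-- ===== CLAIM (what is proved, stated in full; the proofs are below) =====
def Claim_equal_isSubStringsNoCase : Prop := ∀ (string : String) (subString : String), Dom_isSubStringsNoCase string subString → Spec_isSubStringsNoCase string subString (isSubStringsNoCase string subString)

-- ===== LEMMAS AND PROOFS =====

-- strip is the identity on whitespace-free words
theorem strip_eq_self (w : List Char) (h : ∀ c ∈ w, PySem.Chars.isspace c = false) :
    PySem.Chars.strip w = w := by
  have key : ∀ v : List Char, (∀ c ∈ v, PySem.Chars.isspace c = false) →
      List.dropWhile PySem.Chars.isspace v = v := by
    intro v hv
    apply List.dropWhile_eq_self_iff.mpr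
    intro hne
    exact (Bool.not_eq_true _).mpr (hv _ (List.getElem_mem hne))
  have h1 := key w h
  have h2 := key w.reverse (by intro c hc; exact h c (List.mem_reverse.mp hc))
  simp [PySem.Chars.strip, PySem.Chars.lstrip, PySem.Chars.rstrip, h1, h2]

-- every word produced by str.split() is nonempty and contains no whitespace
theorem split0_go_words : ∀ (s cur : List Char) (acc : List (List Char)),
    (∀ c ∈ cur, PySem.Chars.isspace c = false) →
    (∀ w ∈ acc, w ≠ [] ∧ ∀ c ∈ w, PySem.Chars.isspace c = false) →
    ∀ w ∈ PySem.Chars.split₀.go s cur acc, w ≠ [] ∧ ∀ c ∈ w, PySem.Chars.isspace c = false := by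
  intro s
  induction s with
  | nil =>
    intro cur acc hcur hacc w hw
    by_cases hc : cur = []
    · subst hc; simp [PySem.Chars.split₀.go] at hw; exact hacc w hw
    · simp [PySem.Chars.split₀.go, List.isEmpty_iff, hc] at hw
      rcases hw with h | h
      · exact hacc w h
      · subst h
        refine ⟨by simpa using hc, ?_⟩
        intro c hcmem; exact hcur c (List.mem_reverse.mp hcmem)
  | cons a t ih =>
    intro cur acc hcur hacc w hw
    by_cases hsp : PySem.Chars.isspace a = true
    · by_cases hc : cur = []
      · subst hc
        simp only [PySem.Chars.split₀.go, hsp, List.isEmpty_nil] at hw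
        exact ih [] acc (by simp) hacc w hw
      · simp only [PySem.Chars.split₀.go, hsp, List.isEmpty_iff, if_neg hc] at hw
        refine ih [] (cur.reverse :: acc) (by simp) ?_ w hw
        intro v hv
        rcases List.mem_cons.mp hv with h | h
        · subst h
          exact ⟨by simpa using hc, fun c hcmem => hcur c (List.mem_reverse.mp hcmem)⟩
        · exact hacc v h
    · simp only [PySem.Chars.split₀.go, if_neg hsp] at hw
      refine ih (a :: cur) acc ?_ hacc w hw
      intro c hcmem
      rcases List.mem_cons.mp hcmem with h | h
      · subst h; simpa using hsp
      · exact hcur c h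

theorem split0_words (s : List Char) :
    ∀ w ∈ PySem.Chars.split₀ s, w ≠ [] ∧ ∀ c ∈ w, PySem.Chars.isspace c = false := by
  exact split0_go_words s [] [] (by simp) (by simp)

-- A's inner scan over enumerate(string) from position i is substring search in string.drop i
theorem slice_nat (s : List Char) (i m : Nat) :
    PySem.List.slice s (some (i : Int)) (some ((i : Int) + (m : Int))) = (s.drop i).take m := by
  simp [pysem]

theorem isSubStringGo_eq : ∀ (t : List Char) (i : Nat) (s w : List Char), w ≠ [] →
    t = s.drop i →
    isSubStringGo s w w.length (PySem.List.enumerate t (i : Int)) = PySem.Chars.isIn w (List.drop i s) := by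
  intro t
  induction t with
  | nil =>
    intro i s w hw ht
    rw [← ht]
    rcases w with _ | ⟨c0, w'⟩
    · exact absurd rfl hw
    have hfalse : PySem.Chars.isIn (c0 :: w') ([] : List Char) = false :=
      (PySem.Chars.isIn_eq_false_iff _ _).mpr (by simp)
    simp [PySem.List.enumerate, isSubStringGo, hfalse]
  | cons x rest ih =>
    intro i s w hw ht
    rcases w with _ | ⟨c0, w'⟩
    · exact absurd rfl hw
    have hdrop1 : rest = List.drop (i + 1) s := by
      rw [show List.drop (i+1) s = List.drop 1 (List.drop i s) by simp [List.drop_drop]]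
      rw [← ht]; simp
    have hcast : ((i : Int) + 1) = ((i + 1 : Nat) : Int) := by push_cast; ring
    have hrec := ih (i+1) s (c0 :: w') hw hdrop1
    simp only [List.length_cons] at hrec
    have hslice : PySem.List.slice s (some (i : Int)) (some ((i : Int) + ((w'.length : Int) + 1))) =
        (s.drop i).take (w'.length + 1) := by
      rw [show ((w'.length : Int) + 1) = ((w'.length + 1 : Nat) : Int) by push_cast; ring]
      exact slice_nat s i (w'.length + 1)
    have hget : PySem.List.pyGet? (c0 :: w') 0 = some c0 := by
      simp [PySem.List.pyGet?, PySem.List.pyIdx?]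
    rw [PySem.List.enumerate_cons]
    simp only [List.length_cons, isSubStringGo, hget]
    rw [hcast, hrec]
    by_cases hpre : (c0 :: w') <+: List.drop i s
    · have htake : List.take (w'.length + 1) (List.drop i s) = c0 :: w' := by
        have := List.prefix_iff_eq_take.mp hpre
        simpa using this.symm
      have hx : x = c0 := by
        have h1 : (x :: rest)[0]? = (List.drop i s)[0]? := by rw [ht]
        have h2 : (List.drop i s)[0]? = some c0 := by
          rcases hpre with ⟨u, hu⟩
          rw [← hu]; rfl
        simp [h2] at h1; exact h1
      have htrue : PySem.Chars.isIn (c0 :: w') (List.drop i s) = true :=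
        (PySem.Chars.isIn_iff_infix _ _).mpr hpre.isInfix
      rw [htrue]
      simp [hx, hslice, htake]
    · have hsame : PySem.Chars.isIn (c0 :: w') (List.drop i s) =
          PySem.Chars.isIn (c0 :: w') (List.drop (i+1) s) := by
        rcases Bool.eq_false_or_eq_true (PySem.Chars.isIn (c0 :: w') (List.drop (i+1) s)) with h | h <;> rw [h]
        · rw [PySem.Chars.isIn_iff_infix] at h ⊢
          rw [← hdrop1] at h
          rw [← ht]
          exact h.trans (List.suffix_cons x rest).isInfix
        · rw [PySem.Chars.isIn_eq_false_iff] at h ⊢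
          intro hin
          rw [← ht, List.infix_cons_iff] at hin
          rcases hin with hin | hin
          · exact hpre (ht ▸ hin)
          · exact h (hdrop1 ▸ hin)
      rw [hsame]
      have hne : ((c0 :: w') = PySem.List.slice s (some (i:Int)) (some ((i:Int) + ((w'.length:Int) + 1)))) ↔ False := by
        rw [hslice]
        constructor
        · intro heq; exact hpre (heq ▸ List.take_prefix _ _)
        · exact False.elim
      by_cases hx : x = c0
      · simp [hx, hne]
      · simp [hx]

theorem isSubStringA_eq (s w : List Char) (hw : w ≠ []) :
    isSubStringA s w = PySem.Chars.isIn w s := by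
  have := isSubStringGo_eq s 0 s w hw (by simp)
  simpa [isSubStringA, PySem.List.enumerate] using this

-- the counting loop: both counters move in lockstep, so it is an 'all' plus a nonemptiness test
theorem loopA_eq (s : List Char) : ∀ (ws : List (List Char)) (c : Int),
    loopA s ws c c = ((ws.all fun w => isSubStringA s (PySem.Chars.strip w)) && decide (0 < c + ws.length)) := by
  intro ws
  induction ws with
  | nil => intro c; simp [loopA]
  | cons w rest ih =>
    intro c
    by_cases h : isSubStringA s (PySem.Chars.strip w) = true
    · have := ih (c + 1)
      simp only [loopA, h, this]
      have : (0 < c + 1 + (rest.length : Int)) ↔ (0 < c + ((w :: rest).length : Int)) := by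
        simp; omega
      simp [List.all_cons, h, this]
    · simp only [Bool.not_eq_true] at h
      simp [loopA, h]

theorem all_congr_mem (ws : List (List Char)) (P Q : List Char → Bool)
    (h : ∀ w ∈ ws, P w = Q w) : ws.all P = ws.all Q := by
  induction ws with
  | nil => rfl
  | cons a t ih => simp_all

-- ===== VERDICT (by name: the statement is the Claim_ definition above) =====
theorem isSubStringsNoCase_spec : Claim_equal_isSubStringsNoCase := by
  intro string subString _
  unfold Spec_isSubStringsNoCase isSubStringsNoCase isSubStringsNoCase_alt
  set s := PySem.Chars.upper string.toList with hs
  set ws := PySem.Chars.split₀ (PySem.Chars.upper subString.toList) with hws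
  have hwords := split0_words (PySem.Chars.upper subString.toList)
  rw [loopA_eq]
  have hall : (ws.all fun w => isSubStringA s (PySem.Chars.strip w)) =
      (ws.all fun w => PySem.Chars.isIn w s) := by
    apply all_congr_mem
    intro w hw
    have ⟨hne, hnsp⟩ := hwords w (hws ▸ hw)
    rw [strip_eq_self w hnsp, isSubStringA_eq s w hne]
  rw [hall]
  have hlen : decide (0 < (0 : Int) + (ws.length : Int)) = !ws.isEmpty := by
    rcases ws with _ | ⟨a, t⟩ <;> simp
  rw [hlen]
  dsimp only
  rw [Bool.and_comm]
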